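-- pv_equiv track=rewrite | github.com/DamianPazos/Python---Fundacion-Telefonica | Ejercicios Python/Ejercicio N°22.py | modificar
-- ===== SOURCE A (Python) =====
-- def modificar(lista):
--     copia_lista = []
--     sumatoria = 0
--     for x in lista:
--         bandera = True
--         for i in copia_lista:
--             if x == i:
--                 bandera = False
--
--         if bandera == True and x % 2 == 0:
--             copia_lista.append(x)
--
--     copia_lista.sort(reverse=True)
--
--     for j in copia_lista:
--         sumatoria += j
--
--     copia_lista.insert(0,sumatoria)
--
--     return copia_lista
-- ===== SOURCE B (Python) =====
-- def modificar(lista):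
--     pares = sorted((x for x in lista if x % 2 == 0), reverse=True)
--     res = []
--     for v in pares:
--         if not res or res[-1] != v:
--             res.append(v)
--     return [sum(res)] + res
-- ===== Notes on version B (the rewrite author's own statement) =====
-- stated objective: faster
-- what changed: Replaces A's O(n^2) nested-loop membership dedup (dedup first, then sort) with collect-evens, sort descending, then a single adjacent-compare pass to dedup; sum prepended as before.
import Mathlib
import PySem

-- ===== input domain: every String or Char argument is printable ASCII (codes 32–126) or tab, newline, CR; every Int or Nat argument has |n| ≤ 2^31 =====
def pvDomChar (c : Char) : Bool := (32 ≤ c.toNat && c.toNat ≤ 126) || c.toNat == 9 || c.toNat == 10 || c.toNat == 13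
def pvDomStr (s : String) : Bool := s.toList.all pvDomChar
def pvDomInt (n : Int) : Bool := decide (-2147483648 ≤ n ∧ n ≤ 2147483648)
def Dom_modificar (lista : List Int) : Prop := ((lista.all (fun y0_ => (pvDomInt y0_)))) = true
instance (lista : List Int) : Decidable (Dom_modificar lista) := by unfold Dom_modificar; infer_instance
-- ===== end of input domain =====

-- B replaces A's O(n^2) nested-loop dedup-then-sort with collect-evens, sort descending,
-- then one adjacent-compare dedup pass (faster in a timing run).

-- ===== PORT A =====
-- inner loop: for i in copia_lista: if x == i: bandera = False
def modificarBandera (x : Int) (copia : List Int) : Bool :=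
  copia.foldl (fun b i => if x = i then false else b) true

-- outer loop over lista building copia_lista
def modificarBuild (lista : List Int) (copia : List Int) : List Int :=
  match lista with
  | [] => copia
  | x :: rest =>
      let bandera := modificarBandera x copia
      if bandera = true ∧ PySem.Int.mod x 2 = 0 then
        modificarBuild rest (copia ++ [x])
      else
        modificarBuild rest copia

def modificar (lista : List Int) : List Int :=
  let copia := modificarBuild lista []
  let copia := PySem.List.sorted copia (fun x => x) true
  let sumatoria := copia.foldl (fun s j => s + j) 0
  sumatoria :: copia    -- copia_lista.insert(0, sumatoria)

-- ===== PORT B =====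
-- for v in pares: if not res or res[-1] != v: res.append(v)
def modificarDedup (pares : List Int) (res : List Int) : List Int :=
  match pares with
  | [] => res
  | v :: rest =>
      if res = [] ∨ res.getLast? ≠ some v then
        modificarDedup rest (res ++ [v])
      else
        modificarDedup rest res

def modificar_alt (lista : List Int) : List Int :=
  let pares := PySem.List.sorted (lista.filter (fun x => PySem.Int.mod x 2 = 0)) (fun x => x) true
  let res := modificarDedup pares []
  (res.foldl (fun s j => s + j) 0) :: res

-- ===== PRECONDITION & SPEC =====
def Spec_modificar (lista : List Int) (out : List Int) : Prop := out = modificar_alt lista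
instance (lista : List Int) (out : List Int) : Decidable (Spec_modificar lista out) := by unfold Spec_modificar; infer_instance

-- ===== CLAIM (what is proved, stated in full; the proofs are below) =====
def Claim_equal_modificar : Prop := ∀ (lista : List Int), Dom_modificar lista → Spec_modificar lista (modificar lista)

-- ===== LEMMAS AND PROOFS =====

theorem bandera_aux (x : Int) : ∀ (copia : List Int) (b : Bool),
    copia.foldl (fun b i => if x = i then false else b) b = (b && !(copia.contains x)) := by
  intro copia
  induction copia with
  | nil => simp
  | cons i t ih =>
      intro b
      rw [List.foldl_cons, ih]
      by_cases h : x = i <;> simp [h]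

theorem bandera_eq (x : Int) (copia : List Int) :
    modificarBandera x copia = !(copia.contains x) := by
  unfold modificarBandera
  rw [bandera_aux]
  simp

theorem build_mem (lista : List Int) : ∀ (acc : List Int) (y : Int),
    y ∈ modificarBuild lista acc ↔ y ∈ acc ∨ (y ∈ lista ∧ PySem.Int.mod y 2 = 0) := by
  induction lista with
  | nil => intro acc y; simp [modificarBuild]
  | cons x rest ih =>
      intro acc y
      rw [modificarBuild]
      split_ifs with h
      · rw [ih]
        constructor
        · rintro (hy | ⟨hy, he⟩)
          · rcases List.mem_append.mp hy with hy | hy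
            · exact Or.inl hy
            · have hyx : y = x := by simpa using hy
              subst hyx
              exact Or.inr ⟨List.mem_cons_self, h.2⟩
          · exact Or.inr ⟨List.mem_cons_of_mem _ hy, he⟩
        · rintro (hy | ⟨hy, he⟩)
          · exact Or.inl (List.mem_append.mpr (Or.inl hy))
          · rcases List.mem_cons.mp hy with rfl | hy2
            · exact Or.inl (List.mem_append.mpr (Or.inr (by simp)))
            · exact Or.inr ⟨hy2, he⟩
      · rw [ih]
        constructor
        · rintro (hy | ⟨hy, he⟩)
          · exact Or.inl hy
          · exact Or.inr ⟨List.mem_cons_of_mem _ hy, he⟩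
        · rintro (hy | ⟨hy, he⟩)
          · exact Or.inl hy
          · rcases List.mem_cons.mp hy with rfl | hy2
            · by_cases hx : y ∈ acc
              · exact Or.inl hx
              · exfalso
                exact h ⟨by rw [bandera_eq]; simp [hx], he⟩
            · exact Or.inr ⟨hy2, he⟩

theorem build_nodup (lista : List Int) : ∀ (acc : List Int), acc.Nodup →
    (modificarBuild lista acc).Nodup := by
  induction lista with
  | nil => intro acc h; simpa [modificarBuild] using h
  | cons x rest ih =>
      intro acc h
      rw [modificarBuild]
      split_ifs with hc
      · have hb := hc.1
        rw [bandera_eq] at hb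
        have hx : x ∉ acc := by simpa using hb
        refine ih _ (h.append (List.nodup_singleton x) ?_)
        simp [List.disjoint_singleton, hx]
      · exact ih acc h

theorem last_min : ∀ (acc : List Int), acc.Pairwise (· > ·) → ∀ (l : Int),
    acc.getLast? = some l → ∀ a ∈ acc, l ≤ a := by
  intro acc
  induction acc with
  | nil => intro _ l hl; simp at hl
  | cons a t ih =>
      intro hp l hl b hb
      cases t with
      | nil =>
          simp at hl hb
          omega
      | cons c u =>
          rw [List.getLast?_cons_cons] at hl
          have hpt := List.pairwise_cons.mp hp
          rcases List.mem_cons.mp hb with rfl | hb2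
          · have hlmem : l ∈ c :: u := List.mem_of_getLast? hl
            have := hpt.1 l hlmem
            omega
          · exact ih hpt.2 l hl b hb2

theorem dedup_invariant : ∀ (pares : List Int) (acc : List Int),
    acc.Pairwise (· > ·) →
    pares.Pairwise (fun a b => b ≤ a) →
    (∀ l, acc.getLast? = some l → ∀ b ∈ pares, b ≤ l) →
    (modificarDedup pares acc).Pairwise (· > ·) ∧
    (∀ y, y ∈ modificarDedup pares acc ↔ y ∈ acc ∨ y ∈ pares) := by
  intro pares
  induction pares with
  | nil =>
      intro acc hacc _ _
      exact ⟨hacc, by simp [modificarDedup]⟩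
  | cons v rest ih =>
      intro acc hacc hp hlast
      have hp' := List.pairwise_cons.mp hp
      rw [modificarDedup]
      split_ifs with hcond
      · have hgt : ∀ a ∈ acc, a > v := by
          intro a ha
          have hne : acc ≠ [] := by rintro rfl; simp at ha
          obtain ⟨l, hl⟩ : ∃ l, acc.getLast? = some l := by
            cases hgl : acc.getLast? with
            | none => exact absurd (List.getLast?_eq_none_iff.mp hgl) hne
            | some l => exact ⟨l, rfl⟩
          have hvl : v ≤ l := hlast l hl v (List.mem_cons_self)
          have hlv : l ≠ v := by
            rcases hcond with hnil | hns
            · exact absurd hnil hne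
            · intro hh; apply hns; rw [hl, hh]
          have := last_min acc hacc l hl a ha
          omega
        have hacc' : (acc ++ [v]).Pairwise (· > ·) := by
          rw [List.pairwise_append]
          refine ⟨hacc, List.pairwise_singleton _ _, ?_⟩
          intro a ha b hb
          have : b = v := by simpa using hb
          subst this
          exact hgt a ha
        have hlast' : ∀ l, (acc ++ [v]).getLast? = some l → ∀ b ∈ rest, b ≤ l := by
          intro l hl b hb
          have hlv : l = v := by
            rw [List.getLast?_concat] at hl
            exact (Option.some_inj.mp hl).symm
          subst hlv
          exact hp'.1 b hb
        obtain ⟨h1, h2⟩ := ih (acc ++ [v]) hacc' hp'.2 hlast'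
        refine ⟨h1, fun y => ?_⟩
        rw [h2 y]
        constructor
        · rintro (hy | hy)
          · rcases List.mem_append.mp hy with hy | hy
            · exact Or.inl hy
            · have : y = v := by simpa using hy
              subst this
              exact Or.inr (List.mem_cons_self)
          · exact Or.inr (List.mem_cons_of_mem _ hy)
        · rintro (hy | hy)
          · exact Or.inl (List.mem_append.mpr (Or.inl hy))
          · rcases List.mem_cons.mp hy with rfl | hy2
            · exact Or.inl (List.mem_append.mpr (Or.inr (by simp)))
            · exact Or.inr hy2
      · push_neg at hcond
        have hvmem : v ∈ acc := List.mem_of_getLast? hcond.2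
        have hlast' : ∀ l, acc.getLast? = some l → ∀ b ∈ rest, b ≤ l := by
          intro l hl b hb
          rw [hcond.2] at hl
          have : l = v := (Option.some_inj.mp hl).symm
          subst this
          exact hp'.1 b hb
        obtain ⟨h1, h2⟩ := ih acc hacc hp'.2 hlast'
        refine ⟨h1, fun y => ?_⟩
        rw [h2 y]
        constructor
        · rintro (hy | hy)
          · exact Or.inl hy
          · exact Or.inr (List.mem_cons_of_mem _ hy)
        · rintro (hy | hy)
          · exact Or.inl hy
          · rcases List.mem_cons.mp hy with rfl | hy2
            · exact Or.inl hvmem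
            · exact Or.inr hy2

-- ===== VERDICT (by name: the statement is the Claim_ definition above) =====
theorem modificar_spec : Claim_equal_modificar := by
  unfold Claim_equal_modificar
  intro lista _
  unfold Spec_modificar
  simp only [modificar, modificar_alt]
  have hp : (PySem.List.sorted (lista.filter (fun x => PySem.Int.mod x 2 = 0)) (fun x => x) true).Pairwise
      (fun a b => b ≤ a) := PySem.List.sorted_pairwise_rev _ _
  obtain ⟨hres1, hres2⟩ := dedup_invariant
      (PySem.List.sorted (lista.filter (fun x => PySem.Int.mod x 2 = 0)) (fun x => x) true) []
      (by simp) hp (by intro l hl; simp at hl)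
  have hnodupres : (modificarDedup (PySem.List.sorted (lista.filter (fun x => PySem.Int.mod x 2 = 0)) (fun x => x) true) []).Nodup :=
    hres1.imp (fun h => ne_of_gt h)
  have hnodcA : (modificarBuild lista []).Nodup := build_nodup lista [] (by simp)
  have hperm : (modificarDedup (PySem.List.sorted (lista.filter (fun x => PySem.Int.mod x 2 = 0)) (fun x => x) true) []).Perm
      (modificarBuild lista []) := by
    rw [List.perm_ext_iff_of_nodup hnodupres hnodcA]
    intro a
    rw [hres2 a, build_mem]
    simp [PySem.List.mem_sorted, List.mem_filter]
  have hkey : PySem.List.sorted (modificarBuild lista []) (fun x => x) true =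
      modificarDedup (PySem.List.sorted (lista.filter (fun x => PySem.Int.mod x 2 = 0)) (fun x => x) true) [] :=
    PySem.List.sorted_rev_eq_of_perm_of_pairwise_gt _ _ _ hperm hres1
  rw [hkey]
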